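-- pv_equiv track=rewrite | github.com/vishnuchakr/196-Homeworks | hw4.py | string_my_one_true_love
-- ===== SOURCE A (Python) =====
-- def string_my_one_true_love(s):
--     if (len(s) == 0 or s == None):
--         return True
--
--     dictOfChars = {i : 0 for i in s}
--     returnBool = True
--
--     for i in s:
--         dictOfChars[i] += 1
--
--     arr = list(dictOfChars.values())
--
--     changeCount = 0
--     goodCount = 0
--     diff = 0
--     maxDiff = 0
--     for i in range(0, len(arr) - 1):
--
--         if arr[i] != arr[i + 1]:
--             returnBool = False
--             diff = abs(arr[i + 1] - arr[i])
--             goodCount = arr[i]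
--
--             for j in range(i, len(arr)):
--                 if arr[j] != goodCount:
--                     changeCount += diff
--
--             if diff > maxDiff:
--                 maxDiff = diff
--
--     if (returnBool == True) or (maxDiff <= 1 and changeCount <= 1) or (1 + diff == goodCount):
--         return True
--
--     return False
-- ===== SOURCE B (Python) =====
-- def string_my_one_true_love(s):
--     if len(s) == 0:
--         return True
--     cnt = {}
--     for ch in s:
--         cnt[ch] = cnt.get(ch, 0) + 1
--     arr = list(cnt.values())
--     suffix = {}
--     for v in arr:
--         suffix[v] = suffix.get(v, 0) + 1
--     constant = True
--     changeCount = 0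
--     good = 0
--     diff = 0
--     maxDiff = 0
--     remaining = len(arr)
--     for prev, nxt in zip(arr, arr[1:]):
--         if prev != nxt:
--             constant = False
--             diff = abs(nxt - prev)
--             good = prev
--             changeCount += diff * (remaining - suffix[prev])
--             if diff > maxDiff:
--                 maxDiff = diff
--         remaining -= 1
--         suffix[prev] = suffix[prev] - 1
--     return constant or (maxDiff <= 1 and changeCount <= 1) or (1 + diff == good)
-- ===== Notes on version B (the rewrite author's own statement) =====
-- stated objective: alternative
-- what changed: Replaces A's per-mismatch rescan of the whole tail of the frequency array by a suffix value-counter maintained in one sweep over adjacent pairs, so each mismatch is handled in O(1); measured only ~1.3x on generated inputs since the distinct-value count k stays small there.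
import Mathlib
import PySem

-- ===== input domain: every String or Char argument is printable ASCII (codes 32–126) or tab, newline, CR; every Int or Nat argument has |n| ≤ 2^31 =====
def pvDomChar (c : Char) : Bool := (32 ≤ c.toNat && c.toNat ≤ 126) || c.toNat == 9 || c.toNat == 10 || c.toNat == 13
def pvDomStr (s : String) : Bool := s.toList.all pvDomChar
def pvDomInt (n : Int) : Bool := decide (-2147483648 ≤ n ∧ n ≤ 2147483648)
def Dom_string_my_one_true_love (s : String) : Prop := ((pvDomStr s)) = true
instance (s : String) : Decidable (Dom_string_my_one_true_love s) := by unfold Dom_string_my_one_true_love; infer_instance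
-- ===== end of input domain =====

-- B replaces A's per-mismatch rescan of the tail of the frequency array by a suffix
-- value-counter maintained in one sweep over adjacent pairs (objective: alternative).

-- ===== PORT A =====
def string_my_one_true_love (s : String) : Bool :=
  let l := s.toList
  if l.length = 0 then true
  else
    let d0 : PySem.Dict Char Int := l.foldl (fun d c => d.insert c 0) PySem.Dict.empty
    let d1 := l.foldl (fun d c => d.modify c 0 (· + 1)) d0
    let arr := d1.values
    let n : Int := arr.length
    let st := (PySem.List.pyRange 0 (n - 1) 1).foldl
      (fun (st : Bool × Int × Int × Int × Int) i =>
        match st with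
        | (rb, cc, gc, df, md) =>
          let ai := PySem.List.pyGetD arr i 0
          let ai1 := PySem.List.pyGetD arr (i + 1) 0
          if ai ≠ ai1 then
            let diff := |ai1 - ai|
            let good := ai
            let cc' := (PySem.List.pyRange i n 1).foldl
              (fun c j => if PySem.List.pyGetD arr j 0 ≠ good then c + diff else c) cc
            (false, cc', good, diff, if diff > md then diff else md)
          else (rb, cc, gc, df, md))
      (true, 0, 0, 0, 0)
    match st with
    | (rb, cc, gc, df, md) =>
      if (rb = true) ∨ (md ≤ 1 ∧ cc ≤ 1) ∨ (1 + df = gc) then true else false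

-- ===== PORT B =====
def string_my_one_true_love_alt (s : String) : Bool :=
  let l := s.toList
  if l.length = 0 then true
  else
    let cnt : PySem.Dict Char Int := l.foldl (fun d c => d.modify c 0 (· + 1)) PySem.Dict.empty
    let arr := cnt.values
    let suffix : PySem.Dict Int Int := arr.foldl (fun d v => d.modify v 0 (· + 1)) PySem.Dict.empty
    let st := (arr.zip (arr.drop 1)).foldl
      (fun (st : (Bool × Int × Int × Int × Int) × PySem.Dict Int Int × Int) pr =>
        match st, pr with
        | ((cst, cc, gd, df, md), sfx, rem), (prev, nxt) =>
          let core :=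
            if prev ≠ nxt then
              let diff := |nxt - prev|
              (false, cc + diff * (rem - sfx.getD prev 0), prev, diff,
                if diff > md then diff else md)
            else (cst, cc, gd, df, md)
          (core, sfx.modify prev 0 (· - 1), rem - 1))
      ((true, 0, 0, 0, 0), suffix, (arr.length : Int))
    match st.1 with
    | (cst, cc, gd, df, md) =>
      if (cst = true) ∨ (md ≤ 1 ∧ cc ≤ 1) ∨ (1 + df = gd) then true else false

-- ===== PRECONDITION & SPEC =====
def Spec_string_my_one_true_love (s : String) (out : Bool) : Prop := out = string_my_one_true_love_alt s
instance (s : String) (out : Bool) : Decidable (Spec_string_my_one_true_love s out) := by unfold Spec_string_my_one_true_love; infer_instance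

-- ===== CLAIM (what is proved, stated in full; the proofs are below) =====
def Claim_equal_string_my_one_true_love : Prop := ∀ (s : String), Dom_string_my_one_true_love s → Spec_string_my_one_true_love s (string_my_one_true_love s)

-- ===== LEMMAS AND PROOFS =====

-- the frequency array both programs build: counts of the distinct chars in first-occurrence order
def freqList (l : List Char) : List Int :=
  (PySem.Set.ofList l).map (fun c => (l.count c : Int))

def arrA (l : List Char) : List Int :=
  (l.foldl (fun d c => d.modify c 0 (· + 1))
    (l.foldl (fun d c => d.insert c 0) PySem.Dict.empty)).values

def arrB (l : List Char) : List Int :=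
  (l.foldl (fun d c => d.modify c 0 (· + 1)) (PySem.Dict.empty : PySem.Dict Char Int)).values

def stepA (arr : List Int) (st : Bool × Int × Int × Int × Int) (i : Int) :
    Bool × Int × Int × Int × Int :=
  match st with
  | (rb, cc, gc, df, md) =>
    let ai := PySem.List.pyGetD arr i 0
    let ai1 := PySem.List.pyGetD arr (i + 1) 0
    if ai ≠ ai1 then
      let diff := |ai1 - ai|
      let good := ai
      let cc' := (PySem.List.pyRange i ((arr.length : Int)) 1).foldl
        (fun c j => if PySem.List.pyGetD arr j 0 ≠ good then c + diff else c) cc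
      (false, cc', good, diff, if diff > md then diff else md)
    else (rb, cc, gc, df, md)

def stepB (st : (Bool × Int × Int × Int × Int) × PySem.Dict Int Int × Int) (pr : Int × Int) :
    (Bool × Int × Int × Int × Int) × PySem.Dict Int Int × Int :=
  match st, pr with
  | ((cst, cc, gd, df, md), sfx, rem), (prev, nxt) =>
    let core :=
      if prev ≠ nxt then
        let diff := |nxt - prev|
        (false, cc + diff * (rem - sfx.getD prev 0), prev, diff,
          if diff > md then diff else md)
      else (cst, cc, gd, df, md)
    (core, sfx.modify prev 0 (· - 1), rem - 1)

def finalCond (st : Bool × Int × Int × Int × Int) : Bool :=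
  match st with
  | (rb, cc, gc, df, md) =>
    if (rb = true) ∨ (md ≤ 1 ∧ cc ≤ 1) ∨ (1 + df = gc) then true else false

def runA (l : List Char) : Bool :=
  finalCond ((PySem.List.pyRange 0 (((arrA l).length : Int) - 1) 1).foldl
    (stepA (arrA l)) (true, 0, 0, 0, 0))

def runB (l : List Char) : Bool :=
  (((arrB l).zip ((arrB l).drop 1)).foldl stepB
    ((true, 0, 0, 0, 0),
      (arrB l).foldl (fun d v => d.modify v 0 (· + 1)) PySem.Dict.empty,
      ((arrB l).length : Int))).1 |> finalCond

theorem A_unfold (s : String) :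
    string_my_one_true_love s = if s.toList.length = 0 then true else runA s.toList := rfl

theorem B_unfold (s : String) :
    string_my_one_true_love_alt s = if s.toList.length = 0 then true else runB s.toList := rfl

-- common reference loop over the frequency array, by structural recursion
def specLoop : List Int → Bool × Int × Int × Int × Int → Bool × Int × Int × Int × Int
  | x :: y :: t, (rb, cc, gc, df, md) =>
    if x ≠ y then
      specLoop (y :: t)
        (false, cc + |y - x| * (((x :: y :: t).countP (fun z => decide (z ≠ x)) : Nat) : Int),
          x, |y - x|, if |y - x| > md then |y - x| else md)
    else specLoop (y :: t) (rb, cc, gc, df, md)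
  | _, st => st

theorem specLoop_short (l : List Int) (h : l.length ≤ 1) (st) : specLoop l st = st := by
  match l, st with
  | [], (rb, cc, gc, df, md) => rfl
  | [x], (rb, cc, gc, df, md) => rfl
  | x :: y :: t, _ => simp at h

-- A's inner rescan is diff * (number of tail elements ≠ good)
theorem innerA (l : List Int) (good diff cc : Int) :
    l.foldl (fun c z => if z ≠ good then c + diff else c) cc
      = cc + diff * ((l.countP (fun z => decide (z ≠ good)) : Nat) : Int) := by
  induction l generalizing cc with
  | nil => simp
  | cons x t ih =>
    rw [List.foldl_cons, ih, List.countP_cons]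
    by_cases hx : x = good <;> simp [hx] <;> push_cast <;> ring

-- A's indexed outer loop equals specLoop on the corresponding suffix
theorem loopA (arr : List Int) (k : Nat) (st : Bool × Int × Int × Int × Int) :
    (PySem.List.pyRange (k : Int) ((arr.length : Int) - 1) 1).foldl (stepA arr) st
      = specLoop (arr.drop k) st := by
  generalize hm : arr.length - 1 - k = m
  induction m generalizing k st with
  | zero =>
    have h1 : ((arr.length : Int) - 1) ≤ (k : Int) := by omega
    rw [PySem.List.pyRange_one_eq_nil h1, List.foldl_nil, specLoop_short]
    have := List.length_drop (l := arr) (i := k)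
    omega
  | succ m ih =>
    have hk : (k : Int) < (arr.length : Int) - 1 := by push_cast; omega
    rw [PySem.List.pyRange_one_cons hk, List.foldl_cons]
    obtain ⟨x, y, t, hd⟩ : ∃ x y t, arr.drop k = x :: y :: t := by
      match hdk : arr.drop k with
      | [] => exfalso; have := List.length_drop (l := arr) (i := k); rw [hdk] at this; simp at this; omega
      | [x] => exfalso; have := List.length_drop (l := arr) (i := k); rw [hdk] at this; simp at this; omega
      | x :: y :: t => exact ⟨x, y, t, rfl⟩
    have hgk : arr[k]? = some x := by
      have h := (List.getElem?_drop : (arr.drop k)[0]? = arr[k + 0]?)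
      rw [hd] at h; simpa using h.symm
    have hgk1 : arr[k + 1]? = some y := by
      have h := (List.getElem?_drop : (arr.drop k)[1]? = arr[k + 1]?)
      rw [hd] at h; simpa using h.symm
    have hx : PySem.List.pyGetD arr (k : Int) 0 = x := by
      rw [PySem.List.pyGetD_natCast, List.getD_eq_getElem?_getD, hgk]; rfl
    have hy : PySem.List.pyGetD arr ((k : Int) + 1) 0 = y := by
      have hc : ((k : Int) + 1) = ((k + 1 : Nat) : Int) := by push_cast; ring
      rw [hc, PySem.List.pyGetD_natCast, List.getD_eq_getElem?_getD, hgk1]; rfl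
    have hdrop1 : arr.drop (k + 1) = y :: t := by
      rw [← List.tail_drop, hd]; rfl
    have hc : ((k : Int) + 1) = ((k + 1 : Nat) : Int) := by push_cast; ring
    have hinner : ∀ (good diff cc : Int),
        (PySem.List.pyRange (k : Int) ((arr.length : Int)) 1).foldl
          (fun c j => if PySem.List.pyGetD arr j 0 ≠ good then c + diff else c) cc
        = cc + diff * (((x :: y :: t).countP (fun z => decide (z ≠ good)) : Nat) : Int) := by
      intro good diff cc
      rw [PySem.List.foldl_pyRange_pyGetD' arr 0
        (fun c z => if z ≠ good then c + diff else c) cc (by positivity)]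
      rw [Int.toNat_natCast, hd, innerA]
    obtain ⟨rb, cc, gc, df, md⟩ := st
    by_cases hxy : x = y
    · have hstep : stepA arr (rb, cc, gc, df, md) (k : Int) = (rb, cc, gc, df, md) := by
        simp [stepA, hx, hy, hxy]
      rw [hstep, hc, ih (k + 1) _ (by omega), hdrop1, hd]
      rw [specLoop, if_neg (by simp [hxy])]
    · have hstep : stepA arr (rb, cc, gc, df, md) (k : Int) =
          (false, cc + |y - x| * (((x :: y :: t).countP (fun z => decide (z ≠ x)) : Nat) : Int),
            x, |y - x|, if |y - x| > md then |y - x| else md) := by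
        simp only [stepA, hx, hy]
        rw [if_pos (show x ≠ y from hxy), hinner]
      rw [hstep, hc, ih (k + 1) _ (by omega), hdrop1, hd]
      rw [specLoop, if_pos (show x ≠ y from hxy)]

-- B's sweep with the suffix counter equals specLoop
theorem loopB (l : List Int) (cst : Bool × Int × Int × Int × Int)
    (sfx : PySem.Dict Int Int) (rem : Int)
    (hs : ∀ v, sfx.getD v 0 = (l.count v : Int)) (hr : rem = (l.length : Int)) :
    ((l.zip (l.drop 1)).foldl stepB (cst, sfx, rem)).1 = specLoop l cst := by
  induction l generalizing cst sfx rem with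
  | nil => obtain ⟨rb, cc, gc, df, md⟩ := cst; rfl
  | cons x t ih =>
    match t, ih with
    | [], _ => obtain ⟨rb, cc, gc, df, md⟩ := cst; rfl
    | y :: t, ih =>
      obtain ⟨rb, cc, gc, df, md⟩ := cst
      have hzip : ((x :: y :: t).zip ((x :: y :: t).drop 1))
          = (x, y) :: ((y :: t).zip ((y :: t).drop 1)) := rfl
      rw [hzip, List.foldl_cons]
      have hcount : rem - sfx.getD x 0
          = (((x :: y :: t).countP (fun z => decide (z ≠ x)) : Nat) : Int) := by
        rw [hs x, hr]
        have h1 : (x :: y :: t).length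
            = (x :: y :: t).countP (fun z => decide (z = x))
              + (x :: y :: t).countP (fun z => decide (¬ z = x)) := by
          simpa using List.length_eq_countP_add_countP (l := x :: y :: t)
            (fun z => decide (z = x))
        have h2 : (x :: y :: t).count x = (x :: y :: t).countP (fun z => decide (z = x)) := by
          rw [List.count_eq_countP]
          exact List.countP_congr (by intro a _; simp)
        have h3 := congrArg (fun n : Nat => (n : Int)) h1
        push_cast at h3 ⊢
        simp only [ne_eq]
        omega
      have hsfx' : ∀ v, (sfx.modify x 0 (· - 1)).getD v 0 = ((y :: t).count v : Int) := by
        intro v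
        rw [PySem.Dict.getD_modify, hs v]
        by_cases hv : v = x
        · subst hv
          rw [hs v]
          simp [List.count_cons]
        · simp [List.count_cons, hv]
          omega
      have hrem' : rem - 1 = (((y :: t).length : Nat) : Int) := by
        rw [hr]; simp only [List.length_cons]; push_cast; try ring
      by_cases hxy : x = y
      · have hstep : stepB ((rb, cc, gc, df, md), sfx, rem) (x, y)
            = ((rb, cc, gc, df, md), sfx.modify x 0 (· - 1), rem - 1) := by
          simp [stepB, hxy]
        rw [hstep, ih _ _ _ hsfx' hrem']
        rw [specLoop, if_neg (by simp [hxy])]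
      · have hstep : stepB ((rb, cc, gc, df, md), sfx, rem) (x, y)
            = ((false, cc + |y - x| * (((x :: y :: t).countP
                  (fun z => decide (z ≠ x)) : Nat) : Int),
                x, |y - x|, if |y - x| > md then |y - x| else md),
              sfx.modify x 0 (· - 1), rem - 1) := by
          simp only [stepB]
          rw [if_pos (show x ≠ y from hxy), hcount]
        rw [hstep, ih _ _ _ hsfx' hrem']
        rw [specLoop, if_pos (show x ≠ y from hxy)]

-- the first pass of A (insert-0 loop) leaves value 0 at every key of the list
theorem getD_foldl_insert_zero (l : List Char) (d : PySem.Dict Char Int) (v : Char) :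
    (l.foldl (fun d c => d.insert c 0) d).getD v 0
      = if v ∈ l then 0 else d.getD v 0 := by
  induction l generalizing d with
  | nil => simp
  | cons x t ih =>
    rw [List.foldl_cons, ih]
    by_cases hv : v ∈ t
    · simp [hv]
    · by_cases hx : v = x <;> simp [hv, hx, PySem.Dict.getD_insert]

theorem set_update_self (l : List Char) :
    (PySem.Set.ofList l).update l = PySem.Set.ofList l := by
  rw [PySem.Set.update_eq_append_filter]
  have : (PySem.Set.ofList l).filter (fun y => !(PySem.Set.ofList l).contains y)
      = ([] : List Char) := by
    apply List.filter_eq_nil_iff.mpr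
    intro a ha
    simp
    exact (PySem.Set.mem_ofList l a).mp ha
  rw [this, List.append_nil]

theorem arrA_eq (l : List Char) : arrA l = freqList l := by
  unfold arrA freqList
  set d0 := l.foldl (fun d c => d.insert c 0) (PySem.Dict.empty : PySem.Dict Char Int) with hd0
  have hk0 : d0.keys = PySem.Set.ofList l := by
    rw [hd0, PySem.Dict.keys_foldl_insert l (fun _ _ => 0)]
    simp [PySem.Set.update_nil_left]
  have hkeys : (l.foldl (fun d c => d.modify c 0 (· + 1)) d0).keys = PySem.Set.ofList l := by
    rw [PySem.Dict.keys_foldl_modify l 0 (fun _ _ v => v + 1) d0, hk0, set_update_self]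
  have hnd : (l.foldl (fun d c => d.modify c 0 (· + 1)) d0).keys.Nodup := by
    rw [hkeys]; exact PySem.Set.nodup_ofList l
  rw [PySem.Dict.values_eq_map_keys _ hnd 0, hkeys]
  apply List.map_congr_left
  intro c hc
  rw [PySem.Dict.getD_foldl_modify_add_one, getD_foldl_insert_zero]
  simp [(PySem.Set.mem_ofList l c).mp hc]

theorem arrB_eq (l : List Char) : arrB l = freqList l := by
  unfold arrB freqList
  rw [← PySem.Dict.counter_eq_foldl]
  rw [PySem.Dict.values_eq_map_keys _ (PySem.Dict.nodup_keys_counter l) 0,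
    PySem.Dict.keys_counter]
  apply List.map_congr_left
  intro c hc
  rw [PySem.Dict.getD_counter]

theorem runA_eq (l : List Char) :
    runA l = finalCond (specLoop (freqList l) (true, 0, 0, 0, 0)) := by
  unfold runA
  have h := loopA (arrA l) 0 (true, 0, 0, 0, 0)
  simp only [Nat.cast_zero, List.drop_zero] at h
  rw [h, arrA_eq]

theorem runB_eq (l : List Char) :
    runB l = finalCond (specLoop (freqList l) (true, 0, 0, 0, 0)) := by
  unfold runB
  have h := loopB (arrB l) (true, 0, 0, 0, 0)
    ((arrB l).foldl (fun d v => d.modify v 0 (· + 1)) PySem.Dict.empty)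
    ((arrB l).length : Int)
    (by
      intro v
      rw [← PySem.Dict.counter_eq_foldl, PySem.Dict.getD_counter])
    rfl
  rw [h, arrB_eq]

-- ===== VERDICT (by name: the statement is the Claim_ definition above) =====
theorem string_my_one_true_love_spec : Claim_equal_string_my_one_true_love := by
  intro s _
  unfold Spec_string_my_one_true_love
  rw [A_unfold, B_unfold]
  by_cases h : s.toList.length = 0
  · simp [h]
  · rw [if_neg h, if_neg h, runA_eq, runB_eq]
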